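-- pv_equiv track=rewrite | github.com/didiforgithub/AEnv | benchmarks/22_ColumnStrategy/env_validator.py | _get_longest_sequence
-- ===== SOURCE A (Python) =====
-- from typing import Dict, Any, List, Tuple, Optional
--
-- def _get_longest_sequence(grid: List[List[int]], player: int) -> int:
--     """Get the longest existing sequence for the player."""
--     max_length = 0
--     height = len(grid)
--     width = len(grid[0])
--
--     # Check all positions
--     for row in range(height):
--         for col in range(width):
--             if grid[row][col] == player:
--                 # Check all 4 directions from this position
--                 directions = [(0, 1), (1, 0), (1, 1), (1, -1)]  # right, down, diagonal-right, diagonal-left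
--
--                 for dr, dc in directions:
--                     length = 1
--                     r, c = row + dr, col + dc
--                     while (0 <= r < height and 0 <= c < width and grid[r][c] == player):
--                         length += 1
--                         r += dr
--                         c += dc
--                     max_length = max(max_length, length)
--
--     return max_length
-- ===== SOURCE B (Python) =====
-- def _get_longest_sequence(grid, player):
--     """Get the longest existing sequence for the player.
--
--     Dynamic programming, one row-major pass: for each of the 4 directions,
--     the longest run ending at a cell is 1 + the run ending at the
--     preceding cell in that direction (already computed), so no run is
--     ever re-walked cell by cell.
--     """
--     height = len(grid)
--     width = len(grid[0])
--     dirs = ((0, 1), (1, 0), (1, 1), (1, -1))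
--     run = {}
--     best = 0
--     for r in range(height):
--         for c in range(width):
--             if grid[r][c] == player:
--                 for i, (dr, dc) in enumerate(dirs):
--                     v = run.get((i, r - dr, c - dc), 0) + 1
--                     run[(i, r, c)] = v
--                     if v > best:
--                         best = v
--     return best
-- ===== Notes on version B (the rewrite author's own statement) =====
-- stated objective: alternative
-- what changed: Replaces A's per-cell directional re-scan (an inner while loop walking each run from every starting cell) with a single row-major dynamic-programming pass that extends the run ending at each cell from its already-computed predecessor stored in a dict, so no cell is re-walked.
import Mathlib
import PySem

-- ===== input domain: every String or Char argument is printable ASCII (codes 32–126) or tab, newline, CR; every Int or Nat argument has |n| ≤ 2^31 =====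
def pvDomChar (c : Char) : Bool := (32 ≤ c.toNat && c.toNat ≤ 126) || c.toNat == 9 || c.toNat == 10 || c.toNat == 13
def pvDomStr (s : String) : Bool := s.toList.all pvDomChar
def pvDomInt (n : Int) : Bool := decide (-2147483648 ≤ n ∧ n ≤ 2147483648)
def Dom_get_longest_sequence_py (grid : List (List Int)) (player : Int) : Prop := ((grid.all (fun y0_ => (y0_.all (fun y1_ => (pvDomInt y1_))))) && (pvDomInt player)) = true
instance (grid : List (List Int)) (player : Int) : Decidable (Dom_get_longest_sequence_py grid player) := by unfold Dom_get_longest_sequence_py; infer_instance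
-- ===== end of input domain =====

-- B is a one-pass dynamic program (longest run ending at each cell, per direction) instead of
-- A's per-cell directional re-scan; the return values agree on all inputs A accepts.

-- ===== PORT A =====
-- the while-condition '0 <= r < height and 0 <= c < width and grid[r][c] == player'
-- (exact on Pre_: there every read grid[r][c] with 0 ≤ c < W is in range, so pyGet? is some)
def pvCell (grid : List (List Int)) (player H W r c : Int) : Bool :=
  decide (0 ≤ r) && decide (r < H) && decide (0 ≤ c) && decide (c < W) &&
    ((PySem.List.pyGet? ((PySem.List.pyGet? grid r).getD []) c).getD 0 == player)

-- the inner while loop: number of consecutive player cells from (r,c) onwards in direction (dr,dc);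
-- fuel-guarded (the loop terminates because each step decreases a measure bounded by 2*H+W)
def pvScan (grid : List (List Int)) (player H W dr dc : Int) : Nat → Int → Int → Int
  | 0, _, _ => 0
  | Nat.succ n, r, c =>
      if pvCell grid player H W r c then 1 + pvScan grid player H W dr dc n (r + dr) (c + dc)
      else 0

def pvFuel (H W : Int) : Nat := (2 * H + W).toNat + 1

def get_longest_sequence_py (grid : List (List Int)) (player : Int) : Int :=
  let H : Int := grid.length
  let W : Int := (grid.headD []).length
  (PySem.List.pyRange 0 H 1).foldl (fun best row =>
    (PySem.List.pyRange 0 W 1).foldl (fun best col =>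
      if pvCell grid player H W row col then
        ([((0:Int),(1:Int)), (1,0), (1,1), (1,-1)]).foldl (fun best d =>
          max best (1 + pvScan grid player H W d.1 d.2 (pvFuel H W) (row + d.1) (col + d.2))) best
      else best) best) 0

-- ===== PORT B =====
def pvDirs : List (Int × Int) := [(0,1),(1,0),(1,1),(1,-1)]

-- 'grid[r][c] == player' (r, c are the loop indices, always in range on Pre_)
def bCell (grid : List (List Int)) (player r c : Int) : Bool :=
  (PySem.List.pyGet? ((PySem.List.pyGet? grid r).getD []) c).getD 0 == player

def get_longest_sequence_py_alt (grid : List (List Int)) (player : Int) : Int :=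
  let H : Int := grid.length
  let W : Int := (grid.headD []).length
  ((PySem.List.pyRange 0 H 1).foldl (fun st r =>
    (PySem.List.pyRange 0 W 1).foldl (fun st c =>
      if bCell grid player r c then
        (PySem.List.enumerate pvDirs 0).foldl (fun st idd =>
          let v := st.1.getD (idd.1, r - idd.2.1, c - idd.2.2) 0 + 1
          (st.1.insert (idd.1, r, c) v, if v > st.2 then v else st.2)) st
      else st) st) ((PySem.Dict.empty : PySem.Dict (Int × Int × Int) Int), (0 : Int))).2

-- ===== PRECONDITION & SPEC =====
-- Pre_ excludes exactly the inputs where the Python A raises IndexError: the empty grid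
-- (it reads grid[0]) and grids with a row shorter than the first row (it reads grid[r][c]
-- for every c < len(grid[0])).  B raises there too.
def Pre_get_longest_sequence_py (grid : List (List Int)) (player : Int) : Prop :=
  grid ≠ [] ∧ ∀ row ∈ grid, (grid.headD []).length ≤ row.length
instance (grid : List (List Int)) (player : Int) : Decidable (Pre_get_longest_sequence_py grid player) := by unfold Pre_get_longest_sequence_py; infer_instance

def pvWitness_get_longest_sequence_py : List (List Int) × Int := ([[1, 1], [0, 1]], 1)

def Spec_get_longest_sequence_py (grid : List (List Int)) (player : Int) (out : Int) : Prop := out = get_longest_sequence_py_alt grid player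
instance (grid : List (List Int)) (player : Int) (out : Int) : Decidable (Spec_get_longest_sequence_py grid player out) := by unfold Spec_get_longest_sequence_py; infer_instance

-- ===== CLAIM (what is proved, stated in full; the proofs are below) =====
def Claim_equal_get_longest_sequence_py : Prop := ∀ (grid : List (List Int)) (player : Int), Dom_get_longest_sequence_py grid player → Pre_get_longest_sequence_py grid player → Spec_get_longest_sequence_py grid player (get_longest_sequence_py grid player)

-- ===== LEMMAS AND PROOFS =====

-- the canonical run length starting at (r,c) in direction (dr,dc)
def pvRun (grid : List (List Int)) (player H W dr dc r c : Int) : Int :=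
  pvScan grid player H W dr dc (pvFuel H W) r c

-- the two termination measures
def pvMuF (H W r c : Int) : Nat := (2 * (H - r) + (W - c)).toNat
def pvMuB (r c : Int) : Nat := (2 * r + c + 1).toNat

lemma pvCell_bounds {grid : List (List Int)} {player H W r c : Int}
    (h : pvCell grid player H W r c = true) : 0 ≤ r ∧ r < H ∧ 0 ≤ c ∧ c < W := by
  simp only [pvCell, Bool.and_eq_true, decide_eq_true_eq] at h
  exact ⟨h.1.1.1.1, h.1.1.1.2, h.1.1.2, h.1.2⟩

lemma pvScan_nonneg (grid : List (List Int)) (player H W dr dc : Int) :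
    ∀ (n : Nat) (r c : Int), 0 ≤ pvScan grid player H W dr dc n r c := by
  intro n
  induction n with
  | zero => intro r c; simp [pvScan]
  | succ n ih =>
      intro r c
      simp only [pvScan]
      split
      · have := ih (r + dr) (c + dc); omega
      · omega

lemma pvScan_stab (grid : List (List Int)) (player H W dr dc : Int) (μ : Int → Int → Nat)
    (hstep : ∀ r c, pvCell grid player H W r c = true → μ (r + dr) (c + dc) < μ r c) :
    ∀ (f₁ f₂ : Nat) (r c : Int), μ r c ≤ f₁ → μ r c ≤ f₂ →
      pvScan grid player H W dr dc f₁ r c = pvScan grid player H W dr dc f₂ r c := by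
  intro f₁
  induction f₁ with
  | zero =>
      intro f₂ r c h1 h2
      have hc : pvCell grid player H W r c = false := by
        by_contra hc'
        have hc'' : pvCell grid player H W r c = true := by
          simpa using hc'
        have := hstep r c hc''
        omega
      cases f₂ with
      | zero => rfl
      | succ m => simp [pvScan, hc]
  | succ n ih =>
      intro f₂ r c h1 h2
      by_cases hc : pvCell grid player H W r c = true
      · have hμ := hstep r c hc
        cases f₂ with
        | zero => omega
        | succ m =>
            simp only [pvScan, hc, if_pos]
            have := ih m (r + dr) (c + dc) (by omega) (by omega)
            omega
      · have hc' : pvCell grid player H W r c = false := by simpa using hc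
        cases f₂ with
        | zero => simp [pvScan, hc']
        | succ m => simp [pvScan, hc']

-- unfolding equation for pvRun (the fuel is always sufficient)
lemma pvRun_unfold (grid : List (List Int)) (player H W dr dc : Int) (μ : Int → Int → Nat)
    (hstep : ∀ r c, pvCell grid player H W r c = true → μ (r + dr) (c + dc) < μ r c)
    (hb : ∀ r c, pvCell grid player H W r c = true → μ r c ≤ (2 * H + W).toNat)
    (r c : Int) :
    pvRun grid player H W dr dc r c =
      if pvCell grid player H W r c then 1 + pvRun grid player H W dr dc (r + dr) (c + dc)
      else 0 := by
  by_cases hc : pvCell grid player H W r c = true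
  · rw [if_pos hc]
    have h1 : pvRun grid player H W dr dc r c =
        1 + pvScan grid player H W dr dc ((2 * H + W).toNat) (r + dr) (c + dc) := by
      simp [pvRun, pvFuel, pvScan, hc]
    have hμ := hstep r c hc
    have hμ' := hb r c hc
    have h2 := pvScan_stab grid player H W dr dc μ hstep ((2 * H + W).toNat)
      (pvFuel H W) (r + dr) (c + dc) (by omega) (by simp [pvFuel]; omega)
    rw [h1, h2]
    rfl
  · have hc' : pvCell grid player H W r c = false := by simpa using hc
    rw [if_neg hc]
    simp [pvRun, pvFuel, pvScan, hc']

lemma pvRun_nonneg (grid : List (List Int)) (player H W dr dc r c : Int) :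
    0 ≤ pvRun grid player H W dr dc r c := pvScan_nonneg grid player H W dr dc _ r c

-- every cell along a positive run is a player cell
lemma pvRun_pos_cell (grid : List (List Int)) (player H W dr dc : Int) (μ : Int → Int → Nat)
    (hstep : ∀ r c, pvCell grid player H W r c = true → μ (r + dr) (c + dc) < μ r c)
    (hb : ∀ r c, pvCell grid player H W r c = true → μ r c ≤ (2 * H + W).toNat) :
    ∀ (j : Nat) (r c : Int), (j : Int) < pvRun grid player H W dr dc r c →
      pvCell grid player H W (r + j * dr) (c + j * dc) = true := by
  intro j
  induction j with
  | zero =>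
      intro r c h
      rw [pvRun_unfold grid player H W dr dc μ hstep hb] at h
      by_cases hc : pvCell grid player H W r c = true
      · simpa using hc
      · rw [if_neg hc] at h
        exact absurd h (by omega)
  | succ j ih =>
      intro r c h
      rw [pvRun_unfold grid player H W dr dc μ hstep hb] at h
      by_cases hc : pvCell grid player H W r c = true
      · rw [if_pos hc] at h
        have h' : (j : Int) < pvRun grid player H W dr dc (r + dr) (c + dc) := by
          push_cast at h
          omega
        have hcell := ih (r + dr) (c + dc) h'
        have e1 : r + dr + (j : Int) * dr = r + ((j : Nat) + 1 : Nat) * dr := by push_cast; ring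
        have e2 : c + dc + (j : Int) * dc = c + ((j : Nat) + 1 : Nat) * dc := by push_cast; ring
        rw [e1, e2] at hcell
        exact hcell
      · rw [if_neg hc] at h
        exact absurd h (by push_cast; omega)

-- a block of player cells bounds the run from below
lemma pvRun_ge_of_run (grid : List (List Int)) (player H W dr dc : Int) (μ : Int → Int → Nat)
    (hstep : ∀ r c, pvCell grid player H W r c = true → μ (r + dr) (c + dc) < μ r c)
    (hb : ∀ r c, pvCell grid player H W r c = true → μ r c ≤ (2 * H + W).toNat) :
    ∀ (n : Nat) (r c : Int),
      (∀ j : Nat, j < n → pvCell grid player H W (r + j * dr) (c + j * dc) = true) →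
      (n : Int) ≤ pvRun grid player H W dr dc r c := by
  intro n
  induction n with
  | zero =>
      intro r c _
      simpa using pvRun_nonneg grid player H W dr dc r c
  | succ n ih =>
      intro r c hrun
      have hc : pvCell grid player H W r c = true := by
        have := hrun 0 (by omega)
        simpa using this
      rw [pvRun_unfold grid player H W dr dc μ hstep hb, if_pos hc]
      have hnext : ∀ j : Nat, j < n →
          pvCell grid player H W (r + dr + j * dr) (c + dc + j * dc) = true := by
        intro j hj
        have := hrun (j + 1) (by omega)
        have e1 : r + ((j : Nat) + 1 : Nat) * dr = r + dr + (j : Int) * dr := by push_cast; ring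
        have e2 : c + ((j : Nat) + 1 : Nat) * dc = c + dc + (j : Int) * dc := by push_cast; ring
        rw [e1, e2] at this
        exact this
      have := ih (r + dr) (c + dc) hnext
      push_cast
      omega

-- measure facts for the four forward directions
lemma pvMeasF (grid : List (List Int)) (player H W : Int) (d : Int × Int) (hd : d ∈ pvDirs) :
    (∀ r c, pvCell grid player H W r c = true → pvMuF H W (r + d.1) (c + d.2) < pvMuF H W r c) ∧
    (∀ r c, pvCell grid player H W r c = true → pvMuF H W r c ≤ (2 * H + W).toNat) := by
  fin_cases hd <;>
    exact ⟨fun r c h => by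
        obtain ⟨h1, h2, h3, h4⟩ := pvCell_bounds h
        simp only [pvMuF]
        omega,
      fun r c h => by
        obtain ⟨h1, h2, h3, h4⟩ := pvCell_bounds h
        simp only [pvMuF]
        omega⟩

-- measure facts for the four backward directions
lemma pvMeasB (grid : List (List Int)) (player H W : Int) (d : Int × Int) (hd : d ∈ pvDirs) :
    (∀ r c, pvCell grid player H W r c = true → pvMuB (r + -d.1) (c + -d.2) < pvMuB r c) ∧
    (∀ r c, pvCell grid player H W r c = true → pvMuB r c ≤ (2 * H + W).toNat) := by
  fin_cases hd <;>
    exact ⟨fun r c h => by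
        obtain ⟨h1, h2, h3, h4⟩ := pvCell_bounds h
        simp only [pvMuB]
        omega,
      fun r c h => by
        obtain ⟨h1, h2, h3, h4⟩ := pvCell_bounds h
        simp only [pvMuB]
        omega⟩

-- convenience unfolding equations for the four forward / backward directions
lemma pvRunF_unfold (grid : List (List Int)) (player H W : Int) (d : Int × Int)
    (hd : d ∈ pvDirs) (r c : Int) :
    pvRun grid player H W d.1 d.2 r c =
      if pvCell grid player H W r c then 1 + pvRun grid player H W d.1 d.2 (r + d.1) (c + d.2)
      else 0 :=
  pvRun_unfold grid player H W d.1 d.2 (pvMuF H W)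
    (pvMeasF grid player H W d hd).1 (pvMeasF grid player H W d hd).2 r c

lemma pvRunB_unfold (grid : List (List Int)) (player H W : Int) (d : Int × Int)
    (hd : d ∈ pvDirs) (r c : Int) :
    pvRun grid player H W (-d.1) (-d.2) r c =
      if pvCell grid player H W r c then
        1 + pvRun grid player H W (-d.1) (-d.2) (r - d.1) (c - d.2)
      else 0 := by
  have := pvRun_unfold grid player H W (-d.1) (-d.2) pvMuB
    (pvMeasB grid player H W d hd).1 (pvMeasB grid player H W d hd).2 r c
  simpa [sub_eq_add_neg] using this

-- transfer: the forward run from a cell is ≤ the backward run at some (player) cell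
lemma pv_transfer (grid : List (List Int)) (player H W dr dc : Int)
    (μ₁ μ₂ : Int → Int → Nat)
    (h₁ : ∀ r c, pvCell grid player H W r c = true → μ₁ (r + dr) (c + dc) < μ₁ r c)
    (hb₁ : ∀ r c, pvCell grid player H W r c = true → μ₁ r c ≤ (2 * H + W).toNat)
    (h₂ : ∀ r c, pvCell grid player H W r c = true → μ₂ (r + -dr) (c + -dc) < μ₂ r c)
    (hb₂ : ∀ r c, pvCell grid player H W r c = true → μ₂ r c ≤ (2 * H + W).toNat)
    (r c : Int) (hc : pvCell grid player H W r c = true) :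
    ∃ r' c', pvCell grid player H W r' c' = true ∧
      pvRun grid player H W dr dc r c ≤ pvRun grid player H W (-dr) (-dc) r' c' := by
  have hrnn := pvRun_nonneg grid player H W dr dc r c
  set n : Nat := (pvRun grid player H W dr dc r c).toNat with hn
  have hcast : (n : Int) = pvRun grid player H W dr dc r c := Int.toNat_of_nonneg hrnn
  have hpos : 1 ≤ n := by
    have hu := pvRun_unfold grid player H W dr dc μ₁ h₁ hb₁ r c
    rw [if_pos hc] at hu
    have := pvRun_nonneg grid player H W dr dc (r + dr) (c + dc)
    omega
  refine ⟨r + ((n - 1 : Nat) : Int) * dr, c + ((n - 1 : Nat) : Int) * dc, ?_, ?_⟩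
  · exact pvRun_pos_cell grid player H W dr dc μ₁ h₁ hb₁ (n - 1) r c (by omega)
  · rw [← hcast]
    apply pvRun_ge_of_run grid player H W (-dr) (-dc) μ₂ h₂ hb₂ n
    intro j hj
    have hcell := pvRun_pos_cell grid player H W dr dc μ₁ h₁ hb₁ (n - 1 - j) r c (by omega)
    have e1 : r + ((n - 1 : Nat) : Int) * dr + (j : Int) * (-dr) = r + ((n - 1 - j : Nat) : Int) * dr := by
      have e : ((n - 1 - j : Nat) : Int) = (n : Int) - 1 - j := by omega
      have e' : ((n - 1 : Nat) : Int) = (n : Int) - 1 := by omega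
      rw [e, e']
      ring
    have e2 : c + ((n - 1 : Nat) : Int) * dc + (j : Int) * (-dc) = c + ((n - 1 - j : Nat) : Int) * dc := by
      have e : ((n - 1 - j : Nat) : Int) = (n : Int) - 1 - j := by omega
      have e' : ((n - 1 : Nat) : Int) = (n : Int) - 1 := by omega
      rw [e, e']
      ring
    rw [e1, e2]
    exact hcell

-- generic fold lemmas for Int accumulators
lemma pvFoldl_mono_init {α : Type} (l : List α) (f : Int → α → Int)
    (hm : ∀ b a, a ∈ l → b ≤ f b a) : ∀ b : Int, b ≤ l.foldl f b := by
  induction l with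
  | nil => intro b; simp
  | cons x t ih =>
      intro b
      have h1 : b ≤ f b x := hm b x (by simp)
      have h2 := ih (fun b a ha => hm b a (by simp [ha])) (f b x)
      simpa using le_trans h1 h2

lemma pvFoldl_le {α : Type} (l : List α) (f : Int → α → Int) (x : Int)
    (h : ∀ b a, a ∈ l → b ≤ x → f b a ≤ x) : ∀ b : Int, b ≤ x → l.foldl f b ≤ x := by
  induction l with
  | nil => intro b hb; simpa using hb
  | cons y t ih =>
      intro b hb
      exact ih (fun b' a ha hb' => h b' a (by simp [ha]) hb') (f b y) (h b y (by simp) hb)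

lemma pvFoldl_elem_le {α : Type} (l : List α) (f : Int → α → Int)
    (hm : ∀ b a, a ∈ l → b ≤ f b a) (a : α) (ha : a ∈ l) (v : Int)
    (hv : ∀ b, v ≤ f b a) : ∀ b : Int, v ≤ l.foldl f b := by
  induction l with
  | nil => cases ha
  | cons y t ih =>
      intro b
      rcases List.mem_cons.mp ha with h | h
      · have h1 : v ≤ f b y := h ▸ hv b
        have h2 := pvFoldl_mono_init t f (fun b a ha => hm b a (by simp [ha])) (f b y)
        exact le_trans h1 (by simpa using h2)
      · exact ih (fun b a ha => hm b a (by simp [ha])) h (f b y)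

-- ===== characterisation of A =====
lemma pvA_nonneg (grid : List (List Int)) (player : Int) :
    0 ≤ get_longest_sequence_py grid player := by
  simp only [get_longest_sequence_py]
  refine pvFoldl_mono_init _ _ (fun b row _ => ?_) 0
  refine pvFoldl_mono_init _ _ (fun b' col _ => ?_) b
  dsimp only
  split
  · exact pvFoldl_mono_init _ _ (fun b'' d _ => le_max_left _ _) b'
  · exact le_rfl

lemma pvA_ge (grid : List (List Int)) (player : Int) (r c : Int) (d : Int × Int)
    (hd : d ∈ pvDirs)
    (hc : pvCell grid player (grid.length) ((grid.headD []).length) r c = true) :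
    pvRun grid player (grid.length) ((grid.headD []).length) d.1 d.2 r c ≤
      get_longest_sequence_py grid player := by
  obtain ⟨h1, h2, h3, h4⟩ := pvCell_bounds hc
  simp only [get_longest_sequence_py]
  refine pvFoldl_elem_le _ _ (fun b row _ => ?_) r ?_ _ (fun b => ?_) 0
  · refine pvFoldl_mono_init _ _ (fun b' col _ => ?_) b
    dsimp only
    split
    · exact pvFoldl_mono_init _ _ (fun b'' d _ => le_max_left _ _) b'
    · exact le_rfl
  · exact (PySem.List.mem_pyRange_one).mpr ⟨h1, h2⟩
  · refine pvFoldl_elem_le _ _ (fun b' col _ => ?_) c ?_ _ (fun b' => ?_) b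
    · dsimp only
      split
      · exact pvFoldl_mono_init _ _ (fun b'' d' _ => le_max_left _ _) b'
      · exact le_rfl
    · exact (PySem.List.mem_pyRange_one).mpr ⟨h3, h4⟩
    · dsimp only
      rw [if_pos hc]
      refine pvFoldl_elem_le _ _ (fun b'' d' _ => le_max_left _ _) d hd _ (fun b'' => ?_) b'
      rw [pvRunF_unfold grid player (grid.length) ((grid.headD []).length) d hd r c, if_pos hc]
      exact le_max_right _ _

lemma pvA_le (grid : List (List Int)) (player : Int) (x : Int) (hx : 0 ≤ x)
    (h : ∀ r c (d : Int × Int), d ∈ pvDirs →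
      pvCell grid player (grid.length) ((grid.headD []).length) r c = true →
      pvRun grid player (grid.length) ((grid.headD []).length) d.1 d.2 r c ≤ x) :
    get_longest_sequence_py grid player ≤ x := by
  simp only [get_longest_sequence_py]
  refine pvFoldl_le _ _ x (fun b row _ hb => ?_) 0 hx
  refine pvFoldl_le _ _ x (fun b' col _ hb' => ?_) b hb
  dsimp only
  split
  · rename_i hc
    refine pvFoldl_le _ _ x (fun b'' d hd hb'' => ?_) b' hb'
    refine max_le hb'' ?_
    have hu := pvRunF_unfold grid player (grid.length) ((grid.headD []).length) d hd row col
    rw [if_pos hc] at hu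
    have := h row col d hd hc
    rw [hu] at this
    exact this
  · exact hb'

-- ===== characterisation of B =====

-- B's loop bodies, named (definitionally equal to the lambdas of the port)
def pvStepDir (_grid : List (List Int)) (_player : Int) (R C : Int)
    (st : PySem.Dict (Int × Int × Int) Int × Int) (idd : Int × Int × Int) :
    PySem.Dict (Int × Int × Int) Int × Int :=
  let v := st.1.getD (idd.1, R - idd.2.1, C - idd.2.2) 0 + 1
  (st.1.insert (idd.1, R, C) v, if v > st.2 then v else st.2)

def pvStepCol (grid : List (List Int)) (player R : Int)
    (st : PySem.Dict (Int × Int × Int) Int × Int) (C : Int) :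
    PySem.Dict (Int × Int × Int) Int × Int :=
  if bCell grid player R C then
    (PySem.List.enumerate pvDirs 0).foldl (pvStepDir grid player R C) st
  else st

def pvStepRow (grid : List (List Int)) (player W : Int)
    (st : PySem.Dict (Int × Int × Int) Int × Int) (R : Int) :
    PySem.Dict (Int × Int × Int) Int × Int :=
  (PySem.List.pyRange 0 W 1).foldl (pvStepCol grid player R) st

lemma pvAlt_eq (grid : List (List Int)) (player : Int) :
    get_longest_sequence_py_alt grid player =
      ((PySem.List.pyRange 0 (grid.length : Int) 1).foldl
        (pvStepRow grid player ((grid.headD []).length : Int))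
        ((PySem.Dict.empty : PySem.Dict (Int × Int × Int) Int), (0 : Int))).2 := rfl

lemma pvEnum : PySem.List.enumerate pvDirs 0 =
    [((0:Int),((0:Int),(1:Int))), (1,(1,0)), (2,(1,1)), (3,(1,-1))] := by decide

lemma pvEnum_snd_mem (p : Int × Int × Int) (hp : p ∈ PySem.List.enumerate pvDirs 0) :
    p.2 ∈ pvDirs := by
  rw [pvEnum] at hp
  fin_cases hp <;> decide

lemma pvDir_pred_ne (d : Int × Int) (hd : d ∈ pvDirs) (R C : Int) :
    ((R - d.1, C - d.2) : Int × Int) ≠ (R, C) := by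
  fin_cases hd <;> simp [Prod.ext_iff]

lemma pvCell_eq_bCell (grid : List (List Int)) (player H W r c : Int)
    (h1 : 0 ≤ r) (h2 : r < H) (h3 : 0 ≤ c) (h4 : c < W) :
    pvCell grid player H W r c = bCell grid player r c := by
  simp [pvCell, bCell, h1, h2, h3, h4]

-- processed-or-out-of-bounds positions, for a scan that has reached row R, column C
def pvProc (H W R C r c : Int) : Bool :=
  decide (r < R ∨ (r = R ∧ c < C) ∨ ¬(0 ≤ r ∧ r < H ∧ 0 ≤ c ∧ c < W))

-- the dictionary invariant: every recorded (or out-of-range) key holds the backward run length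
def pvDI (grid : List (List Int)) (player H W R C : Int)
    (dct : PySem.Dict (Int × Int × Int) Int) : Prop :=
  ∀ i dr dc r c, ((i, (dr, dc)) ∈ PySem.List.enumerate pvDirs 0) →
    dct.getD (i, r, c) 0 =
      if pvProc H W R C r c then pvRun grid player H W (-dr) (-dc) r c else 0

lemma pvFold_pres_key (grid : List (List Int)) (player R C : Int) :
    ∀ (t : List (Int × Int × Int)) (st : PySem.Dict (Int × Int × Int) Int × Int) (i : Int),
      (∀ q ∈ t, q.1 ≠ i) →
      (t.foldl (pvStepDir grid player R C) st).1.getD (i, R, C) 0 =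
        st.1.getD (i, R, C) 0 := by
  intro t
  induction t with
  | nil => intro st i _; rfl
  | cons q' t' ih =>
      intro st i hni
      rw [List.foldl_cons, ih _ i (fun a ha => hni a (by simp [ha]))]
      show (st.1.insert (q'.1, R, C) _).getD (i, R, C) 0 = _
      rw [PySem.Dict.getD_insert, if_neg ?_]
      intro he
      exact hni q' (by simp) (by
        have := congrArg Prod.fst he
        simpa using this.symm)

lemma pvDirFold (grid : List (List Int)) (player H W R C : Int)
    (hpc : pvCell grid player H W R C = true) :
    ∀ (l : List (Int × Int × Int)) (st : PySem.Dict (Int × Int × Int) Int × Int),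
      (∀ p ∈ l, p.2 ∈ pvDirs) →
      (∀ p ∈ l, st.1.getD (p.1, R - p.2.1, C - p.2.2) 0 =
        pvRun grid player H W (-p.2.1) (-p.2.2) (R - p.2.1) (C - p.2.2)) →
      (l.map Prod.fst).Nodup →
      ((∀ k : Int × Int × Int, k.2 ≠ (R, C) →
          (l.foldl (pvStepDir grid player R C) st).1.getD k 0 = st.1.getD k 0) ∧
       (∀ p ∈ l, (l.foldl (pvStepDir grid player R C) st).1.getD (p.1, R, C) 0 =
          pvRun grid player H W (-p.2.1) (-p.2.2) R C) ∧
       st.2 ≤ (l.foldl (pvStepDir grid player R C) st).2 ∧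
       (∀ x, st.2 ≤ x → (∀ p ∈ l, pvRun grid player H W (-p.2.1) (-p.2.2) R C ≤ x) →
          (l.foldl (pvStepDir grid player R C) st).2 ≤ x) ∧
       (∀ p ∈ l, pvRun grid player H W (-p.2.1) (-p.2.2) R C ≤
          (l.foldl (pvStepDir grid player R C) st).2)) := by
  intro l
  induction l with
  | nil =>
      intro st _ _ _
      exact ⟨fun k _ => rfl, fun p hp => absurd hp (by simp), le_rfl,
        fun x hx _ => hx, fun p hp => absurd hp (by simp)⟩
  | cons p t ih =>
      intro st hdirs hlk hnd
      have hpd : p.2 ∈ pvDirs := hdirs p (by simp)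
      set st₁ := pvStepDir grid player R C st p with hst₁
      set v := st.1.getD (p.1, R - p.2.1, C - p.2.2) 0 + 1 with hv
      have hd1 : st₁.1 = st.1.insert (p.1, R, C) v := rfl
      have hd2 : st₁.2 = if v > st.2 then v else st.2 := rfl
      have hvrun : v = pvRun grid player H W (-p.2.1) (-p.2.2) R C := by
        rw [hv, hlk p (by simp)]
        rw [pvRunB_unfold grid player H W p.2 hpd R C, if_pos hpc]
        ring
      have hfold : (p :: t).foldl (pvStepDir grid player R C) st =
          t.foldl (pvStepDir grid player R C) st₁ := rfl
      have hlk₁ : ∀ q ∈ t, st₁.1.getD (q.1, R - q.2.1, C - q.2.2) 0 =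
          pvRun grid player H W (-q.2.1) (-q.2.2) (R - q.2.1) (C - q.2.2) := by
        intro q hq
        have hqd : q.2 ∈ pvDirs := hdirs q (by simp [hq])
        have hne : ((q.1, R - q.2.1, C - q.2.2) : Int × Int × Int) ≠ (p.1, R, C) := by
          intro he
          exact pvDir_pred_ne q.2 hqd R C (by
            have := congrArg Prod.snd he
            simpa using this)
        rw [hd1, PySem.Dict.getD_insert, if_neg hne]
        exact hlk q (by simp [hq])
      have hnd₁ : (t.map Prod.fst).Nodup := by
        simpa using hnd.of_cons
      obtain ⟨c1, c2, c3, c4, c5⟩ := ih st₁ (fun q hq => hdirs q (by simp [hq])) hlk₁ hnd₁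
      have hmono₁ : st.2 ≤ st₁.2 := by
        rw [hd2]; split <;> omega
      have hvle : v ≤ st₁.2 := by
        rw [hd2]; split <;> omega
      refine ⟨?_, ?_, ?_, ?_, ?_⟩
      · intro k hk
        rw [hfold, c1 k hk, hd1, PySem.Dict.getD_insert, if_neg ?_]
        intro he
        apply hk
        have := congrArg Prod.snd he
        simpa using this
      · intro q hq
        rcases List.mem_cons.mp hq with h | h
        · subst h
          have hnotin : ∀ q' ∈ t, q'.1 ≠ q.1 := by
            intro q' hq' he
            have : q.1 ∈ t.map Prod.fst := by
              exact List.mem_map.mpr ⟨q', hq', he⟩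
            simp only [List.map_cons, List.nodup_cons] at hnd
            exact hnd.1 this
          have hpres := pvFold_pres_key grid player R C t st₁ q.1 hnotin
          rw [hfold, hpres, hd1, PySem.Dict.getD_insert, if_pos rfl, ← hvrun]
        · rw [hfold]
          exact c2 q h
      · rw [hfold]; exact le_trans hmono₁ c3
      · intro x hx hall
        rw [hfold]
        refine c4 x ?_ (fun q hq => hall q (by simp [hq]))
        rw [hd2]
        have := hall p (by simp)
        rw [← hvrun] at this
        split <;> omega
      · intro q hq
        rcases List.mem_cons.mp hq with h | h
        · subst h
          rw [hfold, ← hvrun] at *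
          exact le_trans hvle c3
        · rw [hfold]
          exact c5 q h

lemma pvColStep (grid : List (List Int)) (player H W R C : Int)
    (hR1 : 0 ≤ R) (hR2 : R < H) (hC1 : 0 ≤ C) (hC2 : C < W)
    (st : PySem.Dict (Int × Int × Int) Int × Int)
    (hDI : pvDI grid player H W R C st.1) :
    pvDI grid player H W R (C + 1) (pvStepCol grid player R st C).1 ∧
    st.2 ≤ (pvStepCol grid player R st C).2 ∧
    (∀ x, st.2 ≤ x →
      (∀ d ∈ pvDirs, pvCell grid player H W R C = true →
        pvRun grid player H W (-d.1) (-d.2) R C ≤ x) →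
      (pvStepCol grid player R st C).2 ≤ x) ∧
    (pvCell grid player H W R C = true → ∀ d ∈ pvDirs,
      pvRun grid player H W (-d.1) (-d.2) R C ≤ (pvStepCol grid player R st C).2) := by
  have hcb := pvCell_eq_bCell grid player H W R C hR1 hR2 hC1 hC2
  have hproc_iff : ∀ r c : Int, (r, c) ≠ ((R, C) : Int × Int) →
      pvProc H W R (C + 1) r c = pvProc H W R C r c := by
    intro r c hne
    have hne' : r ≠ R ∨ c ≠ C := by
      by_contra hcon
      rw [not_or, not_not, not_not] at hcon
      exact hne (by rw [hcon.1, hcon.2])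
    simp only [pvProc, decide_eq_decide]
    omega
  by_cases hbc : bCell grid player R C = true
  · have hpc : pvCell grid player H W R C = true := by rw [hcb]; exact hbc
    have hstep : pvStepCol grid player R st C =
        (PySem.List.enumerate pvDirs 0).foldl (pvStepDir grid player R C) st := by
      simp [pvStepCol, hbc]
    have hlk : ∀ p ∈ PySem.List.enumerate pvDirs 0,
        st.1.getD (p.1, R - p.2.1, C - p.2.2) 0 =
          pvRun grid player H W (-p.2.1) (-p.2.2) (R - p.2.1) (C - p.2.2) := by
      intro p hp
      have hmem : ((p.1, (p.2.1, p.2.2)) : Int × Int × Int) ∈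
          PySem.List.enumerate pvDirs 0 := by simpa using hp
      rw [hDI p.1 p.2.1 p.2.2 (R - p.2.1) (C - p.2.2) hmem]
      rw [if_pos ?_]
      rw [pvEnum] at hp
      fin_cases hp <;> (simp only [pvProc, decide_eq_true_eq]; omega)
    have hnd : ((PySem.List.enumerate pvDirs 0).map Prod.fst).Nodup := by
      rw [pvEnum]; decide
    obtain ⟨c1, c2, c3, c4, c5⟩ := pvDirFold grid player H W R C hpc
      (PySem.List.enumerate pvDirs 0) st pvEnum_snd_mem hlk hnd
    refine ⟨?_, by rw [hstep]; exact c3, ?_, ?_⟩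
    · intro i dr dc r c hmem
      rw [hstep]
      by_cases hrc : ((r, c) : Int × Int) = (R, C)
      · have hr : r = R := congrArg Prod.fst hrc
        have hc : c = C := congrArg Prod.snd hrc
        subst hr; subst hc
        rw [c2 (i, (dr, dc)) hmem]
        have hp : pvProc H W r (c + 1) r c = true := by
          unfold pvProc
          exact decide_eq_true (Or.inr (Or.inl ⟨rfl, by omega⟩))
        rw [if_pos hp]
      · rw [c1 (i, r, c) (by simpa using hrc)]
        rw [hDI i dr dc r c hmem, hproc_iff r c hrc]
    · intro x hx hall
      rw [hstep]
      exact c4 x hx (fun p hp =>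
        hall p.2 (pvEnum_snd_mem p hp) hpc)
    · intro _ d hd
      rw [hstep]
      have : ∃ i : Int, ((i, d) : Int × Int × Int) ∈ PySem.List.enumerate pvDirs 0 := by
        fin_cases hd
        · exact ⟨0, by rw [pvEnum]; simp⟩
        · exact ⟨1, by rw [pvEnum]; simp⟩
        · exact ⟨2, by rw [pvEnum]; simp⟩
        · exact ⟨3, by rw [pvEnum]; simp⟩
      obtain ⟨i, hi⟩ := this
      exact c5 (i, d) hi
  · have hpc : pvCell grid player H W R C = false := by
      rw [hcb]; simpa using hbc
    have hstep : pvStepCol grid player R st C = st := by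
      simp [pvStepCol, hbc]
    rw [hstep]
    refine ⟨?_, le_rfl, fun x hx _ => hx, fun hcell => absurd hcell (by simp [hpc])⟩
    intro i dr dc r c hmem
    have hd : ((dr, dc) : Int × Int) ∈ pvDirs := pvEnum_snd_mem (i, (dr, dc)) hmem
    by_cases hrc : ((r, c) : Int × Int) = (R, C)
    · have hr : r = R := congrArg Prod.fst hrc
      have hc : c = C := congrArg Prod.snd hrc
      subst hr; subst hc
      rw [hDI i dr dc r c hmem]
      have hp1 : pvProc H W r c r c = false := by
        simp only [pvProc]
        simp only [decide_eq_false_iff_not]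
        omega
      have hp2 : pvProc H W r (c + 1) r c = true := by
        unfold pvProc
        exact decide_eq_true (Or.inr (Or.inl ⟨rfl, by omega⟩))
      rw [hp1, hp2]
      simp only [if_true]
      rw [pvRunB_unfold grid player H W (dr, dc) hd r c]
      simp [hpc]
    · rw [hDI i dr dc r c hmem, hproc_iff r c hrc]

lemma pvDI_row_advance (grid : List (List Int)) (player H W R : Int)
    (dct : PySem.Dict (Int × Int × Int) Int)
    (h : pvDI grid player H W R W dct) : pvDI grid player H W (R + 1) 0 dct := by
  intro i dr dc r c hmem
  rw [h i dr dc r c hmem]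
  have he : pvProc H W R W r c = pvProc H W (R + 1) 0 r c := by
    simp only [pvProc, decide_eq_decide]
    omega
  rw [he]

lemma pvColFold (grid : List (List Int)) (player H W R : Int)
    (hR1 : 0 ≤ R) (hR2 : R < H) :
    ∀ (k : Nat) (C : Int), (W - C).toNat = k → 0 ≤ C → C ≤ W →
    ∀ st : PySem.Dict (Int × Int × Int) Int × Int, pvDI grid player H W R C st.1 →
      (pvDI grid player H W R W
        ((PySem.List.pyRange C W 1).foldl (pvStepCol grid player R) st).1 ∧
       st.2 ≤ ((PySem.List.pyRange C W 1).foldl (pvStepCol grid player R) st).2 ∧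
       (∀ x, st.2 ≤ x →
         (∀ c, C ≤ c → c < W → ∀ d ∈ pvDirs, pvCell grid player H W R c = true →
           pvRun grid player H W (-d.1) (-d.2) R c ≤ x) →
         ((PySem.List.pyRange C W 1).foldl (pvStepCol grid player R) st).2 ≤ x) ∧
       (∀ c, C ≤ c → c < W → ∀ d ∈ pvDirs, pvCell grid player H W R c = true →
         pvRun grid player H W (-d.1) (-d.2) R c ≤
           ((PySem.List.pyRange C W 1).foldl (pvStepCol grid player R) st).2)) := by
  intro k
  induction k with
  | zero =>
      intro C hk hC1 hC2 st hDI
      have hCW : C = W := by omega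
      subst hCW
      rw [PySem.List.pyRange_one_eq_nil le_rfl]
      exact ⟨hDI, le_rfl, fun x hx _ => hx,
        fun c h1 h2 => absurd (lt_of_le_of_lt h1 h2) (lt_irrefl C)⟩
  | succ k ih =>
      intro C hk hC1 hC2 st hDI
      have hCW : C < W := by omega
      rw [PySem.List.pyRange_one_cons hCW, List.foldl_cons]
      obtain ⟨d1, d2, d3, d4⟩ := pvColStep grid player H W R C hR1 hR2 hC1 hCW st hDI
      obtain ⟨e1, e2, e3, e4⟩ := ih (C + 1) (by omega) (by omega) (by omega)
        (pvStepCol grid player R st C) d1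
      refine ⟨e1, le_trans d2 e2, ?_, ?_⟩
      · intro x hx hall
        refine e3 x (d3 x hx ?_) ?_
        · intro d hd hcell
          exact hall C le_rfl hCW d hd hcell
        · intro c h1 h2 d hd hcell
          exact hall c (by omega) h2 d hd hcell
      · intro c h1 h2 d hd hcell
        by_cases hc : c = C
        · subst hc
          exact le_trans (d4 hcell d hd) e2
        · exact e4 c (by omega) h2 d hd hcell

lemma pvRowFold (grid : List (List Int)) (player H W : Int) (hW : 0 ≤ W) :
    ∀ (k : Nat) (R : Int), (H - R).toNat = k → 0 ≤ R → R ≤ H →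
    ∀ st : PySem.Dict (Int × Int × Int) Int × Int, pvDI grid player H W R 0 st.1 →
      (st.2 ≤ ((PySem.List.pyRange R H 1).foldl (pvStepRow grid player W) st).2 ∧
       (∀ x, st.2 ≤ x →
         (∀ r c, R ≤ r → r < H → 0 ≤ c → c < W → ∀ d ∈ pvDirs,
           pvCell grid player H W r c = true →
           pvRun grid player H W (-d.1) (-d.2) r c ≤ x) →
         ((PySem.List.pyRange R H 1).foldl (pvStepRow grid player W) st).2 ≤ x) ∧
       (∀ r c, R ≤ r → r < H → 0 ≤ c → c < W → ∀ d ∈ pvDirs,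
         pvCell grid player H W r c = true →
         pvRun grid player H W (-d.1) (-d.2) r c ≤
           ((PySem.List.pyRange R H 1).foldl (pvStepRow grid player W) st).2)) := by
  intro k
  induction k with
  | zero =>
      intro R hk hR1 hR2 st hDI
      have hRH : R = H := by omega
      subst hRH
      rw [PySem.List.pyRange_one_eq_nil le_rfl]
      exact ⟨le_rfl, fun x hx _ => hx,
        fun r c h1 h2 => absurd (lt_of_le_of_lt h1 h2) (lt_irrefl R)⟩
  | succ k ih =>
      intro R hk hR1 hR2 st hDI
      have hRH : R < H := by omega
      rw [PySem.List.pyRange_one_cons hRH, List.foldl_cons]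
      have hrow : pvStepRow grid player W st R =
          (PySem.List.pyRange 0 W 1).foldl (pvStepCol grid player R) st := rfl
      obtain ⟨f1, f2, f3, f4⟩ := pvColFold grid player H W R hR1 hRH (W - 0).toNat 0 rfl
        le_rfl hW st hDI
      have hDI' := pvDI_row_advance grid player H W R _ f1
      obtain ⟨g1, g2, g3⟩ := ih (R + 1) (by omega) (by omega) (by omega)
        (pvStepRow grid player W st R) (by rw [hrow]; exact hDI')
      refine ⟨?_, ?_, ?_⟩
      · refine le_trans ?_ g1
        rw [hrow]
        exact f2
      · intro x hx hall
        refine g2 x ?_ (fun r c hr1 hr2 hc1 hc2 d hd hcell =>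
          hall r c (by omega) hr2 hc1 hc2 d hd hcell)
        rw [hrow]
        exact f3 x hx (fun c h1 h2 d hd hcell => hall R c le_rfl hRH h1 h2 d hd hcell)
      · intro r c hr1 hr2 hc1 hc2 d hd hcell
        by_cases hr : r = R
        · subst hr
          have hf := f4 c hc1 hc2 d hd hcell
          rw [← hrow] at hf
          exact le_trans hf g1
        · exact g3 r c (by omega) hr2 hc1 hc2 d hd hcell

lemma pvDI_init (grid : List (List Int)) (player H W : Int) :
    pvDI grid player H W 0 0 (PySem.Dict.empty : PySem.Dict (Int × Int × Int) Int) := by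
  intro i dr dc r c hmem
  have hd : ((dr, dc) : Int × Int) ∈ pvDirs := pvEnum_snd_mem (i, (dr, dc)) hmem
  simp only [PySem.Dict.getD_empty]
  by_cases hp : pvProc H W 0 0 r c = true
  · rw [if_pos hp]
    have hcf : pvCell grid player H W r c = false := by
      by_contra hcf'
      have hc : pvCell grid player H W r c = true := by simpa using hcf'
      obtain ⟨h1, h2, h3, h4⟩ := pvCell_bounds hc
      simp only [pvProc, decide_eq_true_eq] at hp
      omega
    rw [pvRunB_unfold grid player H W (dr, dc) hd r c, if_neg (by simp [hcf])]
  · rw [if_neg hp]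

lemma pvB_nonneg (grid : List (List Int)) (player : Int) :
    0 ≤ get_longest_sequence_py_alt grid player := by
  rw [pvAlt_eq]
  exact (pvRowFold grid player (grid.length : Int) ((grid.headD []).length : Int)
    (by positivity) ((grid.length : Int) - 0).toNat 0 rfl le_rfl (by positivity)
    _ (pvDI_init grid player _ _)).1

lemma pvB_ge (grid : List (List Int)) (player : Int) (r c : Int) (d : Int × Int)
    (hd : d ∈ pvDirs)
    (hc : pvCell grid player (grid.length) ((grid.headD []).length) r c = true) :
    pvRun grid player (grid.length) ((grid.headD []).length) (-d.1) (-d.2) r c ≤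
      get_longest_sequence_py_alt grid player := by
  obtain ⟨h1, h2, h3, h4⟩ := pvCell_bounds hc
  rw [pvAlt_eq]
  exact (pvRowFold grid player (grid.length : Int) ((grid.headD []).length : Int)
    (by positivity) ((grid.length : Int) - 0).toNat 0 rfl le_rfl (by positivity)
    _ (pvDI_init grid player _ _)).2.2 r c h1 h2 h3 h4 d hd hc

lemma pvB_le (grid : List (List Int)) (player : Int) (x : Int) (hx : 0 ≤ x)
    (h : ∀ r c (d : Int × Int), d ∈ pvDirs →
      pvCell grid player (grid.length) ((grid.headD []).length) r c = true →
      pvRun grid player (grid.length) ((grid.headD []).length) (-d.1) (-d.2) r c ≤ x) :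
    get_longest_sequence_py_alt grid player ≤ x := by
  rw [pvAlt_eq]
  exact (pvRowFold grid player (grid.length : Int) ((grid.headD []).length : Int)
    (by positivity) ((grid.length : Int) - 0).toNat 0 rfl le_rfl (by positivity)
    _ (pvDI_init grid player _ _)).2.1 x hx
    (fun r c _ _ _ _ d hd hcell => h r c d hd hcell)

-- ===== VERDICT (by name: the statement is the Claim_ definition above) =====
theorem get_longest_sequence_py_spec : Claim_equal_get_longest_sequence_py := by
  intro grid player _ _
  unfold Spec_get_longest_sequence_py
  apply le_antisymm
  · apply pvA_le grid player _ (pvB_nonneg grid player)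
    intro r c d hd hc
    obtain ⟨r', c', hc', hle⟩ := pv_transfer grid player (grid.length : Int)
      ((grid.headD []).length : Int) d.1 d.2 (pvMuF _ _) pvMuB
      (pvMeasF grid player _ _ d hd).1 (pvMeasF grid player _ _ d hd).2
      (pvMeasB grid player _ _ d hd).1 (pvMeasB grid player _ _ d hd).2 r c hc
    exact le_trans hle (pvB_ge grid player r' c' d hd hc')
  · apply pvB_le grid player _ (pvA_nonneg grid player)
    intro r c d hd hc
    obtain ⟨r', c', hc', hle⟩ := pv_transfer grid player (grid.length : Int)
      ((grid.headD []).length : Int) (-d.1) (-d.2) pvMuB (pvMuF _ _)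
      (pvMeasB grid player _ _ d hd).1 (pvMeasB grid player _ _ d hd).2
      (fun r c h => by simpa using (pvMeasF grid player _ _ d hd).1 r c h)
      (pvMeasF grid player _ _ d hd).2 r c hc
    rw [neg_neg, neg_neg] at hle
    exact le_trans hle (pvA_ge grid player r' c' d hd hc')
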